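-- pv_equiv track=rewrite | github.com/pchamely1/GoT_splice | NMD_caller_final.py | allInOneNMDFinder
-- ===== SOURCE A (Python) =====
-- def allInOneNMDFinder(strand, nucleotideSeq, codonsPos, codonsNeg):
--     '''from the nucleotide sequence with the correct start, if there is a stop codon prior to the last exon-exon junction + 50 nt, it likely goes through NMD'''
--     try:
--         if strand == '-':
--             nucleotideSeq = nucleotideSeq[::-1]
--             codons = [x[::-1] for x in codonsNeg]
--         else:
--             codons = codonsPos
--         codonList = [nucleotideSeq[0+i:3+i] for i in range(0, len(nucleotideSeq), 3)]
--         if strand == '-':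
--             codonList = codonList[::-1]
--         codonList = set(codonList)
--         if len(set(codonList).intersection(codons)) > 0:
--             return('NMD')
--         else:
--             return('not NMD')
--     except:
--         return('')
-- ===== SOURCE B (Python) =====
-- def allInOneNMDFinder(strand, nucleotideSeq, codonsPos, codonsNeg):
--     '''Same NMD call, without building the codon list/set: walk the frame
--     three nucleotides at a time and stop at the first stop codon.'''
--     if strand == '-':
--         rest = nucleotideSeq[::-1]
--         stops = [c[::-1] for c in codonsNeg]
--     else:
--         rest = nucleotideSeq
--         stops = codonsPos
--     while rest:
--         if rest[:3] in stops:
--             return 'NMD'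
--         rest = rest[3:]
--     return 'not NMD'
-- ===== Notes on version B (the rewrite author's own statement) =====
-- stated objective: simpler
-- what changed: Replaces list-comprehension chunking plus set construction and set intersection with a single early-exit scan that consumes the (strand-adjusted) sequence three characters at a time and returns 'NMD' at the first stop codon.
import Mathlib
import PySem

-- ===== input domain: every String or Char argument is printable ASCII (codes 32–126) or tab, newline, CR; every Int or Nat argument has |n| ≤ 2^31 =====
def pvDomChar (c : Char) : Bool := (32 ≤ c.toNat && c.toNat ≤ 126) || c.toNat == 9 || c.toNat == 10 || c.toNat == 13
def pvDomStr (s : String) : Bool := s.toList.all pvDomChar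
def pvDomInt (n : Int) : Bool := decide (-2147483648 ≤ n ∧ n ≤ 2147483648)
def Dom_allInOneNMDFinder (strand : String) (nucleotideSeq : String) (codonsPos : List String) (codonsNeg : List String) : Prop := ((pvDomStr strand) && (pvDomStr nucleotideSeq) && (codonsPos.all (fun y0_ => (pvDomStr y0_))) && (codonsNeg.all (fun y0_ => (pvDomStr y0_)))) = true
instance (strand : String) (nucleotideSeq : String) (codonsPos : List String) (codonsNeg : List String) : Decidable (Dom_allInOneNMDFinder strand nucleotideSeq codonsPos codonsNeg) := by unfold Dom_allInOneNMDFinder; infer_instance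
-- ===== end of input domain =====

-- B replaces A's codon-list + set + set-intersection with a single early-exit scan that eats the
-- (strand-adjusted) sequence three characters at a time (objective: simpler).
-- A's bare try/except never fires on these argument types, so both functions are total.

-- ===== PORT A =====
-- literal port on .toList; s[::-1] is reverse (PySem.List.slice?_none_none_neg_one)
def allInOneNMDFinder (strand : String) (nucleotideSeq : String) (codonsPos : List String) (codonsNeg : List String) : String :=
  let seq : List Char := if strand = "-" then nucleotideSeq.toList.reverse else nucleotideSeq.toList
  let codons : List String := if strand = "-" then codonsNeg.map (fun x => String.ofList x.toList.reverse) else codonsPos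
  let codonList : List String :=
    (PySem.List.pyRange 0 (seq.length : Int) 3).map
      (fun i => String.ofList (PySem.List.slice seq (some (0 + i)) (some (3 + i))))
  let codonList : List String := if strand = "-" then codonList.reverse else codonList
  let codonSet : PySem.Set String := PySem.Set.ofList codonList
  if 0 < PySem.Set.len (PySem.Set.inter (PySem.Set.ofList codonSet) codons) then "NMD" else "not NMD"

-- ===== PORT B =====
-- the while loop of Source B: 'while rest: if rest[:3] in stops: return "NMD"; rest = rest[3:]'
def altScan (stops : List String) (rest : List Char) : String :=
  if h : rest = [] then "not NMD"
  else if String.ofList (rest.take 3) ∈ stops then "NMD"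
  else altScan stops (rest.drop 3)
termination_by rest.length
decreasing_by
  cases rest with
  | nil => exact absurd rfl h
  | cons c cs => simp [List.drop]

def allInOneNMDFinder_alt (strand : String) (nucleotideSeq : String) (codonsPos : List String) (codonsNeg : List String) : String :=
  let rest : List Char := if strand = "-" then nucleotideSeq.toList.reverse else nucleotideSeq.toList
  let stops : List String := if strand = "-" then codonsNeg.map (fun x => String.ofList x.toList.reverse) else codonsPos
  altScan stops rest

-- ===== PRECONDITION & SPEC =====
def Spec_allInOneNMDFinder (strand : String) (nucleotideSeq : String) (codonsPos : List String) (codonsNeg : List String) (out : String) : Prop := out = allInOneNMDFinder_alt strand nucleotideSeq codonsPos codonsNeg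
instance (strand : String) (nucleotideSeq : String) (codonsPos : List String) (codonsNeg : List String) (out : String) : Decidable (Spec_allInOneNMDFinder strand nucleotideSeq codonsPos codonsNeg out) := by unfold Spec_allInOneNMDFinder; infer_instance

-- ===== CLAIM (what is proved, stated in full; the proofs are below) =====
def Claim_equal_allInOneNMDFinder : Prop := ∀ (strand : String) (nucleotideSeq : String) (codonsPos : List String) (codonsNeg : List String), Dom_allInOneNMDFinder strand nucleotideSeq codonsPos codonsNeg → Spec_allInOneNMDFinder strand nucleotideSeq codonsPos codonsNeg (allInOneNMDFinder strand nucleotideSeq codonsPos codonsNeg)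

-- ===== LEMMAS AND PROOFS =====

-- B's scan answers exactly "some 3-frame chunk of rest is a stop codon".
theorem altScan_mem (stops : List String) (rest : List Char) :
    altScan stops rest = "NMD" ↔
      ∃ k : Nat, String.ofList ((rest.drop (3 * k)).take 3) ∈ stops ∧ rest.drop (3 * k) ≠ [] := by
  induction rest using altScan.induct stops with
  | case1 => simp [altScan]
  | case2 rest h hm =>
      rw [altScan]
      simp only [h, dite_false, if_pos hm]
      constructor
      · intro _; exact ⟨0, by simpa using hm, by simpa using h⟩
      · intro _; trivial
  | case3 rest h hm ih =>
      rw [altScan]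
      simp only [dif_neg h, if_neg hm]
      rw [ih]
      constructor
      · rintro ⟨k, h1, h2⟩
        refine ⟨k + 1, ?_, ?_⟩
        · simpa [List.drop_drop, Nat.mul_add, Nat.add_comm] using h1
        · simpa [List.drop_drop, Nat.mul_add, Nat.add_comm] using h2
      · rintro ⟨k, h1, h2⟩
        cases k with
        | zero => exact absurd (by simpa using h1) hm
        | succ k =>
            refine ⟨k, ?_, ?_⟩
            · simpa [List.drop_drop, Nat.mul_add, Nat.add_comm] using h1
            · simpa [List.drop_drop, Nat.mul_add, Nat.add_comm] using h2

theorem altScan_not (stops : List String) (rest : List Char) (h : altScan stops rest ≠ "NMD") :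
    altScan stops rest = "not NMD" := by
  induction rest using altScan.induct stops with
  | case1 => simp [altScan]
  | case2 rest h1 hm => rw [altScan] at h; simp [h1, hm] at h
  | case3 rest h1 hm ih =>
      rw [altScan] at h ⊢
      simp only [dif_neg h1, if_neg hm] at h ⊢
      exact ih h

-- membership in A's chunk list = the same 3-frame-chunk predicate
theorem memChunk_iff (seq : List Char) (x : String) :
    (x ∈ (PySem.List.pyRange 0 (seq.length : Int) 3).map
        (fun i => String.ofList (PySem.List.slice seq (some (0 + i)) (some (3 + i))))) ↔
      ∃ k : Nat, x = String.ofList ((seq.drop (3 * k)).take 3) ∧ seq.drop (3 * k) ≠ [] := by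
  rw [List.mem_map]
  constructor
  · rintro ⟨i, hi, rfl⟩
    rw [PySem.List.mem_pyRange_iff_of_pos (by norm_num)] at hi
    obtain ⟨h0, hlt, hdvd⟩ := hi
    simp only [sub_zero] at hdvd
    obtain ⟨k, rfl⟩ := hdvd
    have hk : 0 ≤ (k : Int) := by omega
    obtain ⟨m, rfl⟩ := Int.eq_ofNat_of_zero_le hk
    refine ⟨m, ?_, ?_⟩
    · congr 1
      have : (3 : Int) * (m : Int) = ((3 * m : Nat) : Int) := by push_cast; ring
      rw [zero_add, this]
      have h2 : (3 : Int) + ((3 * m : Nat) : Int) = ((3 * m : Nat) : Int) + ((3 : Nat) : Int) := by push_cast; ring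
      rw [h2, PySem.List.slice_natCast_add]
    · intro hnil
      have := List.drop_eq_nil_iff.mp hnil
      omega
  · rintro ⟨k, rfl, hnil⟩
    have hlen : 3 * k < seq.length := by
      by_contra hge
      exact hnil (List.drop_eq_nil_iff.mpr (by omega))
    refine ⟨((3 * k : Nat) : Int), ?_, ?_⟩
    · rw [PySem.List.mem_pyRange_iff_of_pos (by norm_num)]
      refine ⟨by positivity, by exact_mod_cast hlen, ⟨k, by push_cast; ring⟩⟩
    · congr 1
      rw [zero_add]
      have h2 : (3 : Int) + ((3 * k : Nat) : Int) = ((3 * k : Nat) : Int) + ((3 : Nat) : Int) := by push_cast; ring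
      rw [h2, PySem.List.slice_natCast_add]

-- len(set(codonList) & codons) > 0 = some chunk is a stop codon
theorem inter_pos (L stops : List String) :
    (0 < PySem.Set.len (PySem.Set.inter (PySem.Set.ofList (PySem.Set.ofList L)) stops)) ↔
      ∃ y, y ∈ L ∧ y ∈ stops := by
  rw [PySem.Set.ofList_ofList]
  unfold PySem.Set.len
  rw [Int.natCast_pos, List.length_pos_iff]
  constructor
  · intro hne
    obtain ⟨y, hy⟩ := List.exists_mem_of_ne_nil _ hne
    rw [PySem.Set.mem_inter] at hy
    exact ⟨y, (PySem.Set.mem_ofList _ _).mp hy.1, hy.2⟩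
  · rintro ⟨y, h1, h2⟩
    intro hnil
    have : y ∈ PySem.Set.inter (PySem.Set.ofList L) stops :=
      (PySem.Set.mem_inter _ _ _).mpr ⟨(PySem.Set.mem_ofList _ _).mpr h1, h2⟩
    simp [hnil] at this

theorem core (stops : List String) (seq : List Char) (L : List String)
    (hL : ∀ y, y ∈ L ↔ ∃ k : Nat, y = String.ofList ((seq.drop (3 * k)).take 3) ∧ seq.drop (3 * k) ≠ []) :
    (if 0 < PySem.Set.len (PySem.Set.inter (PySem.Set.ofList (PySem.Set.ofList L)) stops) then "NMD" else "not NMD") = altScan stops seq := by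
  by_cases hc : ∃ k : Nat, String.ofList ((seq.drop (3 * k)).take 3) ∈ stops ∧ seq.drop (3 * k) ≠ []
  · rw [if_pos, (altScan_mem stops seq).mpr hc]
    obtain ⟨k, h1, h2⟩ := hc
    exact (inter_pos L stops).mpr ⟨_, (hL _).mpr ⟨k, rfl, h2⟩, h1⟩
  · rw [if_neg, altScan_not]
    · intro hNMD
      exact hc ((altScan_mem stops seq).mp hNMD)
    · intro hpos
      obtain ⟨y, hy, hys⟩ := (inter_pos L stops).mp hpos
      obtain ⟨k, rfl, h2⟩ := (hL y).mp hy
      exact hc ⟨k, hys, h2⟩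

theorem main_eq (strand ns : String) (cp cn : List String) :
    allInOneNMDFinder strand ns cp cn = allInOneNMDFinder_alt strand ns cp cn := by
  unfold allInOneNMDFinder allInOneNMDFinder_alt
  by_cases hs : strand = "-"
  · simp only [hs, if_true]
    exact core _ _ _ (fun y => by rw [List.mem_reverse, memChunk_iff])
  · simp only [if_neg hs]
    exact core _ _ _ (fun y => memChunk_iff _ y)

-- ===== VERDICT (by name: the statement is the Claim_ definition above) =====
theorem allInOneNMDFinder_spec : Claim_equal_allInOneNMDFinder := by
  intro strand nucleotideSeq codonsPos codonsNeg _
  exact main_eq strand nucleotideSeq codonsPos codonsNeg
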